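-- pv_equiv track=rewrite | github.com/sakkardo/boardiq | benchmarking_engine.py | get_neighborhood_cluster
-- ===== SOURCE A (Python) =====
-- NEIGHBORHOOD_CLUSTERS = {
--     "UWS_UES":    ["Upper West Side", "Upper East Side", "Morningside Heights",
--                    "Carnegie Hill", "Yorkville", "Lenox Hill"],
--     "MIDTOWN":    ["Midtown West", "Midtown East", "Murray Hill", "Turtle Bay",
--                    "Hell's Kitchen", "Gramercy", "Kips Bay", "Sutton Place"],
--     "DOWNTOWN":   ["Greenwich Village", "West Village", "SoHo", "TriBeCa",
--                    "Flatiron", "Chelsea", "NoHo", "Nolita", "Little Italy"],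
--     "LES_EV":     ["Lower East Side", "East Village", "Alphabet City"],
--     "BK_PRIME":   ["Park Slope", "Brooklyn Heights", "Cobble Hill", "Carroll Gardens",
--                    "Boerum Hill", "DUMBO", "Fort Greene", "Prospect Heights"],
--     "BK_OTHER":   ["Williamsburg", "Greenpoint", "Bushwick", "Crown Heights",
--                    "Bay Ridge", "Sunset Park", "Flatbush", "Prospect Lefferts Gardens"],
--     "QNS_PRIME":  ["Astoria", "Long Island City", "Jackson Heights", "Sunnyside",
--                    "Forest Hills", "Rego Park", "Flushing"],
--     "BX_SI":      ["Riverdale", "Fordham", "Pelham Bay", "Concourse",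
--                    "St. George", "Stapleton"],
-- }
--
-- def get_neighborhood_cluster(neighborhood: str, borough: str) -> str:
--     """Map a neighborhood to its pricing cluster."""
--     for cluster, neighborhoods in NEIGHBORHOOD_CLUSTERS.items():
--         if neighborhood in neighborhoods:
--             return cluster
--     # Fallback by borough
--     fallback = {
--         "Manhattan": "MIDTOWN",
--         "Brooklyn":  "BK_OTHER",
--         "Queens":    "QNS_PRIME",
--         "Bronx":     "BX_SI",
--         "Staten Island": "BX_SI",
--     }
--     return fallback.get(borough, "MIDTOWN")
-- ===== SOURCE B (Python) =====
-- NEIGHBORHOOD_CLUSTERS = {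
--     "UWS_UES":    ["Upper West Side", "Upper East Side", "Morningside Heights",
--                    "Carnegie Hill", "Yorkville", "Lenox Hill"],
--     "MIDTOWN":    ["Midtown West", "Midtown East", "Murray Hill", "Turtle Bay",
--                    "Hell's Kitchen", "Gramercy", "Kips Bay", "Sutton Place"],
--     "DOWNTOWN":   ["Greenwich Village", "West Village", "SoHo", "TriBeCa",
--                    "Flatiron", "Chelsea", "NoHo", "Nolita", "Little Italy"],
--     "LES_EV":     ["Lower East Side", "East Village", "Alphabet City"],
--     "BK_PRIME":   ["Park Slope", "Brooklyn Heights", "Cobble Hill", "Carroll Gardens",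
--                    "Boerum Hill", "DUMBO", "Fort Greene", "Prospect Heights"],
--     "BK_OTHER":   ["Williamsburg", "Greenpoint", "Bushwick", "Crown Heights",
--                    "Bay Ridge", "Sunset Park", "Flatbush", "Prospect Lefferts Gardens"],
--     "QNS_PRIME":  ["Astoria", "Long Island City", "Jackson Heights", "Sunnyside",
--                    "Forest Hills", "Rego Park", "Flushing"],
--     "BX_SI":      ["Riverdale", "Fordham", "Pelham Bay", "Concourse",
--                    "St. George", "Stapleton"],
-- }
--
-- # One flat (name, cluster) table, sorted by name once at module load; each call
-- # binary-searches it.  Borough fallback uses the same sorted-table machinery.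
-- _NEIGHBORHOOD_TABLE = sorted(
--     [(n, c) for c, ns in NEIGHBORHOOD_CLUSTERS.items() for n in ns],
--     key=lambda p: p[0],
-- )
-- _BOROUGH_TABLE = sorted(
--     [("Manhattan", "MIDTOWN"), ("Brooklyn", "BK_OTHER"), ("Queens", "QNS_PRIME"),
--      ("Bronx", "BX_SI"), ("Staten Island", "BX_SI")],
--     key=lambda p: p[0],
-- )
--
--
-- def _bsearch(table, key):
--     """Binary search a (key, value) table sorted by key; None if key absent."""
--     lo, hi = 0, len(table)
--     while lo < hi:
--         mid = (lo + hi) // 2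
--         if table[mid][0] < key:
--             lo = mid + 1
--         else:
--             hi = mid
--     if lo < len(table) and table[lo][0] == key:
--         return table[lo][1]
--     return None
--
--
-- def get_neighborhood_cluster(neighborhood: str, borough: str) -> str:
--     """Map a neighborhood to its pricing cluster."""
--     cluster = _bsearch(_NEIGHBORHOOD_TABLE, neighborhood)
--     if cluster is not None:
--         return cluster
--     fallback = _bsearch(_BOROUGH_TABLE, borough)
--     return fallback if fallback is not None else "MIDTOWN"
-- ===== Notes on version B (the rewrite author's own statement) =====
-- stated objective: alternative
-- what changed: Replaces A's per-call linear scan over the cluster lists (and its fallback dict) by one flat (name, cluster) table sorted by name at module load plus a hand-written binary search, used for both the neighborhood map and the borough fallback.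
import Mathlib
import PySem

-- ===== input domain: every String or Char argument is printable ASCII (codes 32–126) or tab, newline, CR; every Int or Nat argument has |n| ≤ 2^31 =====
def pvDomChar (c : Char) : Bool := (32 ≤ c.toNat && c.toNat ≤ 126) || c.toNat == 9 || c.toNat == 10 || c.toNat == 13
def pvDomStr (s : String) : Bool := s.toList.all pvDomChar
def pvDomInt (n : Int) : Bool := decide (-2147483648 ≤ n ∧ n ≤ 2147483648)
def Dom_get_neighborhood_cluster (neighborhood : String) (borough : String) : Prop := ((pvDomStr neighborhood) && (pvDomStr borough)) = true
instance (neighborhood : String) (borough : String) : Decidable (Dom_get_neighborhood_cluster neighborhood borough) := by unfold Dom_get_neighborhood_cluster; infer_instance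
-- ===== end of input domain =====

-- B replaces A's per-call linear scan over the cluster lists by a flat (name, cluster)
-- table sorted once at module load and a hand-written binary search; objective: alternative.

-- module-level constant shared by both Pythons (NEIGHBORHOOD_CLUSTERS)
def pvClusters : List (String × List String) :=
  [("UWS_UES",    ["Upper West Side", "Upper East Side", "Morningside Heights",
                   "Carnegie Hill", "Yorkville", "Lenox Hill"]),
   ("MIDTOWN",    ["Midtown West", "Midtown East", "Murray Hill", "Turtle Bay",
                   "Hell's Kitchen", "Gramercy", "Kips Bay", "Sutton Place"]),
   ("DOWNTOWN",   ["Greenwich Village", "West Village", "SoHo", "TriBeCa",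
                   "Flatiron", "Chelsea", "NoHo", "Nolita", "Little Italy"]),
   ("LES_EV",     ["Lower East Side", "East Village", "Alphabet City"]),
   ("BK_PRIME",   ["Park Slope", "Brooklyn Heights", "Cobble Hill", "Carroll Gardens",
                   "Boerum Hill", "DUMBO", "Fort Greene", "Prospect Heights"]),
   ("BK_OTHER",   ["Williamsburg", "Greenpoint", "Bushwick", "Crown Heights",
                   "Bay Ridge", "Sunset Park", "Flatbush", "Prospect Lefferts Gardens"]),
   ("QNS_PRIME",  ["Astoria", "Long Island City", "Jackson Heights", "Sunnyside",
                   "Forest Hills", "Rego Park", "Flushing"]),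
   ("BX_SI",      ["Riverdale", "Fordham", "Pelham Bay", "Concourse",
                   "St. George", "Stapleton"])]

-- ===== PORT A =====
-- A's for-loop with early return: scan the cluster pairs in order
def pvScanA (n : String) : List (String × List String) → Option String
  | [] => none
  | p :: rest => if p.2.contains n then some p.1 else pvScanA n rest

def get_neighborhood_cluster (neighborhood : String) (borough : String) : String :=
  match pvScanA neighborhood pvClusters with
  | some cluster => cluster
  | none =>
      -- fallback dict built inside the function, as in A
      (PySem.Dict.ofList
        [("Manhattan", "MIDTOWN"), ("Brooklyn", "BK_OTHER"), ("Queens", "QNS_PRIME"),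
         ("Bronx", "BX_SI"), ("Staten Island", "BX_SI")]).getD borough "MIDTOWN"

-- ===== PORT B =====
-- B's module-level flat tables, sorted by key once (Python: sorted(..., key=lambda p: p[0]))
def pvFlatPairs : List (String × String) :=
  pvClusters.flatMap (fun p => p.2.map (fun n => (n, p.1)))

def pvNbhdTable : List (String × String) :=
  PySem.List.sorted pvFlatPairs (fun p => p.1) false

def pvFallbackList : List (String × String) :=
  [("Manhattan", "MIDTOWN"), ("Brooklyn", "BK_OTHER"), ("Queens", "QNS_PRIME"),
   ("Bronx", "BX_SI"), ("Staten Island", "BX_SI")]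

def pvBoroughTable : List (String × String) :=
  PySem.List.sorted pvFallbackList (fun p => p.1) false

-- B's while-loop: lo, hi are Python ints that stay in [0, len(table)], so Nat is exact;
-- table[mid] is always in range inside the loop (getD's default is never read there)
def pvBsearchGo (t : List (String × String)) (key : String) (lo hi : Nat) : Nat :=
  if _h : lo < hi then
    let mid := (lo + hi) / 2
    if (t.getD mid ("", "")).1 < key then pvBsearchGo t key (mid + 1) hi
    else pvBsearchGo t key lo mid
  else lo
termination_by hi - lo
decreasing_by all_goals omega

def pvBsearch (t : List (String × String)) (key : String) : Option String :=
  let lo := pvBsearchGo t key 0 t.length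
  if lo < t.length && (t.getD lo ("", "")).1 == key then some (t.getD lo ("", "")).2
  else none

def get_neighborhood_cluster_alt (neighborhood : String) (borough : String) : String :=
  match pvBsearch pvNbhdTable neighborhood with
  | some cluster => cluster
  | none =>
      match pvBsearch pvBoroughTable borough with
      | some fb => fb
      | none => "MIDTOWN"

-- ===== PRECONDITION & SPEC =====
def Spec_get_neighborhood_cluster (neighborhood : String) (borough : String) (out : String) : Prop := out = get_neighborhood_cluster_alt neighborhood borough
instance (neighborhood : String) (borough : String) (out : String) : Decidable (Spec_get_neighborhood_cluster neighborhood borough out) := by unfold Spec_get_neighborhood_cluster; infer_instance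

-- ===== CLAIM (what is proved, stated in full; the proofs are below) =====
def Claim_equal_get_neighborhood_cluster : Prop := ∀ (neighborhood : String) (borough : String), Dom_get_neighborhood_cluster neighborhood borough → Spec_get_neighborhood_cluster neighborhood borough (get_neighborhood_cluster neighborhood borough)

-- ===== LEMMAS AND PROOFS =====

-- A's scan equals first-match association lookup in the flattened pair list
theorem lookup_block (n c : String) (ns : List String) (rest : List (String × String)) :
    List.lookup n (ns.map (fun m => (m, c)) ++ rest)
      = if ns.contains n then some c else List.lookup n rest := by
  induction ns with
  | nil => simp
  | cons m ms ih =>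
      by_cases h : n = m
      · subst h; simp [List.lookup]
      · simp [List.lookup, ih, h, beq_eq_false_iff_ne.mpr h]

theorem scanA_eq_lookup (n : String) (cs : List (String × List String)) :
    pvScanA n cs = List.lookup n (cs.flatMap (fun p => p.2.map (fun m => (m, p.1)))) := by
  induction cs with
  | nil => simp [pvScanA]
  | cons p rest ih =>
      simp only [List.flatMap_cons, pvScanA, lookup_block, ih]

-- first-match lookup is invariant under permutation when keys are distinct
theorem lookup_eq_of_perm (k : String) {l₁ l₂ : List (String × String)}
    (h : l₁.Perm l₂) (hnd : (l₁.map Prod.fst).Nodup) :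
    List.lookup k l₁ = List.lookup k l₂ := by
  induction h with
  | nil => rfl
  | cons x _ ih =>
      simp only [List.map_cons, List.nodup_cons] at hnd
      simp [List.lookup, ih hnd.2]
  | swap x y l =>
      simp only [List.map_cons, List.nodup_cons, List.mem_cons] at hnd
      have hxy : y.1 ≠ x.1 := fun e => hnd.1 (Or.inl e)
      by_cases h1 : k = y.1 <;> by_cases h2 : k = x.1
      · exact absurd (h1 ▸ h2 : y.1 = x.1) hxy
      all_goals simp only [List.lookup, *]
      · simp [beq_eq_false_iff_ne.mpr hxy]
      · simp [beq_eq_false_iff_ne.mpr (Ne.symm hxy)]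
      · simp [beq_eq_false_iff_ne.mpr h1, beq_eq_false_iff_ne.mpr h2]
  | trans p q ih1 ih2 =>
      exact (ih1 hnd).trans (ih2 ((p.map Prod.fst).nodup_iff.mp hnd))

-- binary-search loop invariant
theorem bsearchGo_spec (t : List (String × String)) (key : String)
    (hmono : ∀ i j, i ≤ j → j < t.length →
      (t.getD i ("", "")).1 ≤ (t.getD j ("", "")).1)
    (lo hi : Nat) (hlohi : lo ≤ hi) (hhi : hi ≤ t.length)
    (hbelow : ∀ i, i < lo → (t.getD i ("", "")).1 < key)
    (habove : ∀ i, hi ≤ i → i < t.length → ¬ (t.getD i ("", "")).1 < key) :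
    pvBsearchGo t key lo hi ≤ t.length ∧
    (∀ i, i < pvBsearchGo t key lo hi → (t.getD i ("", "")).1 < key) ∧
    (∀ i, pvBsearchGo t key lo hi ≤ i → i < t.length → ¬ (t.getD i ("", "")).1 < key) := by
  fun_induction pvBsearchGo t key lo hi with
  | case1 lo hi h mid hlt ih =>
      refine ih ?_ hhi ?_ habove
      · omega
      · intro i hi'
        by_cases hlo : i < lo
        · exact hbelow i hlo
        · exact lt_of_le_of_lt (hmono i mid (by omega) (by omega)) hlt
  | case2 lo hi h mid hlt ih =>
      refine ih (by omega) ?_ hbelow ?_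
      · omega
      · intro i hmi hilen
        by_cases hcase : hi ≤ i
        · exact habove i hcase hilen
        · intro hPi
          exact hlt (lt_of_le_of_lt (hmono mid i hmi (by omega)) hPi)
  | case3 lo hi h =>
      exact ⟨by omega, hbelow, fun i hli hilen => habove i (by omega) hilen⟩

-- lookup characterisations
theorem lookup_eq_some_of (t : List (String × String)) (key : String) (r : Nat)
    (hr : r < t.length)
    (hbefore : ∀ i, i < r → (t.getD i ("", "")).1 ≠ key)
    (hat : (t.getD r ("", "")).1 = key) :
    List.lookup key t = some (t.getD r ("", "")).2 := by
  induction t generalizing r with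
  | nil => simp at hr
  | cons p rest ih =>
      cases r with
      | zero =>
          simp only [List.getD_cons_zero] at hat ⊢
          simp [List.lookup, hat.symm]
      | succ r' =>
          have h0 : p.1 ≠ key := hbefore 0 (Nat.succ_pos _)
          simp only [List.getD_cons_succ] at hat ⊢
          rw [List.lookup, beq_eq_false_iff_ne.mpr (fun e => h0 e.symm)]
          exact ih r' (by simpa using hr) (fun i hi => hbefore (i+1) (by omega)) hat

theorem lookup_eq_none_of (t : List (String × String)) (key : String)
    (h : ∀ i, i < t.length → (t.getD i ("", "")).1 ≠ key) :
    List.lookup key t = none := by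
  induction t with
  | nil => rfl
  | cons p rest ih =>
      have h0 : p.1 ≠ key := h 0 (by simp)
      rw [List.lookup, beq_eq_false_iff_ne.mpr (fun e => h0 e.symm)]
      exact ih (fun i hi => h (i+1) (by simpa using Nat.succ_lt_succ hi))

-- binary search on a strictly key-sorted table is first-match lookup
theorem bsearch_eq_lookup (t : List (String × String)) (key : String)
    (hstrict : t.Pairwise (fun a b => a.1 < b.1)) :
    pvBsearch t key = List.lookup key t := by
  have hmono : ∀ i j, i ≤ j → j < t.length →
      (t.getD i ("", "")).1 ≤ (t.getD j ("", "")).1 := by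
    intro i j hij hj
    rcases Nat.lt_or_eq_of_le hij with h | h
    · have hg := (List.pairwise_iff_getElem.mp hstrict) i j (by omega) hj h
      rw [List.getD_eq_getElem _ _ (by omega), List.getD_eq_getElem _ _ hj]
      exact le_of_lt hg
    · subst h; exact le_refl _
  obtain ⟨h1, h2, h3⟩ := bsearchGo_spec t key hmono 0 t.length (Nat.zero_le _) le_rfl
    (fun i hi => absurd hi (by omega)) (fun i hi hlen => absurd hlen (by omega))
  unfold pvBsearch
  by_cases hlen : pvBsearchGo t key 0 t.length < t.length
  · by_cases heq : (t.getD (pvBsearchGo t key 0 t.length) ("", "")).1 = key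
    · rw [if_pos (by simp only [Bool.and_eq_true, decide_eq_true_eq, beq_iff_eq]; exact ⟨hlen, heq⟩)]
      exact (lookup_eq_some_of t key _ hlen
        (fun i hi => ne_of_lt (h2 i hi)) heq).symm
    · rw [if_neg (by simp only [Bool.and_eq_true, decide_eq_true_eq, beq_iff_eq]; exact fun h => heq h.2)]
      refine (lookup_eq_none_of t key ?_).symm
      intro i hilen he
      rcases Nat.lt_or_ge i (pvBsearchGo t key 0 t.length) with hc | hc
      · exact absurd he (ne_of_lt (h2 i hc))
      · rcases Nat.eq_or_lt_of_le hc with hc' | hc'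
        · exact heq (hc' ▸ he)
        · have hle : key ≤ (t.getD (pvBsearchGo t key 0 t.length) ("", "")).1 :=
            le_of_not_gt (h3 _ le_rfl hlen)
          have hle2 := hmono _ i (le_of_lt hc') hilen
          exact heq (le_antisymm (he ▸ hle2) hle)
  · rw [if_neg (by simp only [Bool.and_eq_true, decide_eq_true_eq]; exact fun h => hlen h.1)]
    refine (lookup_eq_none_of t key ?_).symm
    intro i hilen
    exact ne_of_lt (h2 i (by omega))

-- the two concrete tables are strictly key-sorted, and lookups transfer to the unsorted lists
theorem flat_keys_nodup : (pvFlatPairs.map Prod.fst).Nodup := by decide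
theorem fb_keys_nodup : (pvFallbackList.map Prod.fst).Nodup := by decide

theorem table_strict (l : List (String × String)) (hnd : (l.map Prod.fst).Nodup) :
    (PySem.List.sorted l (fun p => p.1) false).Pairwise (fun a b => a.1 < b.1) := by
  have hle : (PySem.List.sorted l (fun p => p.1) false).Pairwise (fun a b => a.1 ≤ b.1) :=
    PySem.List.sorted_pairwise l (fun p => p.1)
  have hperm : (PySem.List.sorted l (fun p => p.1) false).Perm l := PySem.List.sorted_perm l _ _
  have hnd' : ((PySem.List.sorted l (fun p => p.1) false).map Prod.fst).Nodup :=
    ((hperm.map Prod.fst).nodup_iff).mpr hnd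
  have hne : (PySem.List.sorted l (fun p => p.1) false).Pairwise (fun a b => a.1 ≠ b.1) :=
    (List.pairwise_map).mp hnd'
  exact (hle.and hne).imp (fun h => lt_of_le_of_ne h.1 h.2)

theorem bsearch_nbhd (n : String) :
    pvBsearch pvNbhdTable n = List.lookup n pvFlatPairs := by
  unfold pvNbhdTable
  rw [bsearch_eq_lookup _ _ (table_strict pvFlatPairs flat_keys_nodup)]
  exact lookup_eq_of_perm n (PySem.List.sorted_perm _ _ _) (((PySem.List.sorted_perm pvFlatPairs (fun p => p.1) false).map Prod.fst).nodup_iff.mpr flat_keys_nodup)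

theorem bsearch_fb (b : String) :
    pvBsearch pvBoroughTable b = List.lookup b pvFallbackList := by
  unfold pvBoroughTable
  rw [bsearch_eq_lookup _ _ (table_strict pvFallbackList fb_keys_nodup)]
  exact lookup_eq_of_perm b (PySem.List.sorted_perm _ _ _) (((PySem.List.sorted_perm pvFallbackList (fun p => p.1) false).map Prod.fst).nodup_iff.mpr fb_keys_nodup)

-- A's fallback dict lookup is assoc-list lookup on the same literal list
theorem dict_fb_eq (b : String) :
    (PySem.Dict.ofList pvFallbackList).getD b "MIDTOWN"
      = (List.lookup b pvFallbackList).getD "MIDTOWN" := by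
  have hof : PySem.Dict.ofList pvFallbackList = PySem.Dict.mk pvFallbackList := by decide
  rw [hof]
  by_cases h1 : b = "Manhattan"
  · subst h1; rfl
  · by_cases h2 : b = "Brooklyn"
    · subst h2; rfl
    · by_cases h3 : b = "Queens"
      · subst h3; rfl
      · by_cases h4 : b = "Bronx"
        · subst h4; rfl
        · by_cases h5 : b = "Staten Island"
          · subst h5; rfl
          · simp [PySem.Dict.getD, PySem.Dict.get?, pvFallbackList, List.lookup, List.find?,
              beq_eq_false_iff_ne.mpr h1, beq_eq_false_iff_ne.mpr h2, beq_eq_false_iff_ne.mpr h3,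
              beq_eq_false_iff_ne.mpr h4, beq_eq_false_iff_ne.mpr h5,
              beq_eq_false_iff_ne.mpr (Ne.symm h1), beq_eq_false_iff_ne.mpr (Ne.symm h2),
              beq_eq_false_iff_ne.mpr (Ne.symm h3), beq_eq_false_iff_ne.mpr (Ne.symm h4),
              beq_eq_false_iff_ne.mpr (Ne.symm h5)]

-- ===== VERDICT (by name: the statement is the Claim_ definition above) =====
theorem get_neighborhood_cluster_spec : Claim_equal_get_neighborhood_cluster := by
  intro neighborhood borough _
  show get_neighborhood_cluster neighborhood borough = get_neighborhood_cluster_alt neighborhood borough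
  unfold get_neighborhood_cluster get_neighborhood_cluster_alt
  rw [bsearch_nbhd, bsearch_fb]
  have hflat : List.lookup neighborhood pvFlatPairs = pvScanA neighborhood pvClusters :=
    (scanA_eq_lookup neighborhood pvClusters).symm
  rw [hflat]
  cases pvScanA neighborhood pvClusters with
  | some c => rfl
  | none =>
      show (PySem.Dict.ofList pvFallbackList).getD borough "MIDTOWN" = _
      rw [dict_fb_eq]
      cases List.lookup borough pvFallbackList <;> rfl
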